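-- pv_equiv track=rewrite | github.com/tomfletch/AdventOfCode2015 | 24/day_24_2.py | find_grouping_options
-- ===== SOURCE A (Python) =====
-- from typing import List, Set
--
-- def find_grouping_options(group_options: List[Set[int]]):
--     for group_1 in group_options:
--
--         for group_2 in group_options:
--             if group_2.intersection(group_1):
--                 continue
--
--             for group_3 in group_options:
--                 if group_3.intersection(group_1) or group_3.intersection(group_2):
--                     continue
--
--                 for group_4 in group_options:
--                     if group_4.intersection(group_1) or group_4.intersection(group_2) or group_4.intersection(group_3):
--                         continue
--
--                     yield [group_1, group_2, group_3, group_4]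
-- ===== SOURCE B (Python) =====
-- from typing import List, Set
--
-- def find_grouping_options(group_options: List[Set[int]]):
--     # Recursive decomposition: build the grouping one group at a time,
--     # carrying the groups chosen so far and the union of their elements.
--     def go(chosen, used):
--         if len(chosen) == 4:
--             yield list(chosen)
--             return
--         for g in group_options:
--             if g & used:
--                 continue
--             yield from go(chosen + [g], used | g)
--     yield from go([], set())
-- ===== Notes on version B (the rewrite author's own statement) =====
-- stated objective: simpler
-- what changed: Replaces the four copy-pasted nested loops with one recursive helper that builds the grouping level by level, carrying the chosen groups and the running union (so each candidate is tested against one accumulated set instead of a chain of pairwise intersection tests).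
import Mathlib
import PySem

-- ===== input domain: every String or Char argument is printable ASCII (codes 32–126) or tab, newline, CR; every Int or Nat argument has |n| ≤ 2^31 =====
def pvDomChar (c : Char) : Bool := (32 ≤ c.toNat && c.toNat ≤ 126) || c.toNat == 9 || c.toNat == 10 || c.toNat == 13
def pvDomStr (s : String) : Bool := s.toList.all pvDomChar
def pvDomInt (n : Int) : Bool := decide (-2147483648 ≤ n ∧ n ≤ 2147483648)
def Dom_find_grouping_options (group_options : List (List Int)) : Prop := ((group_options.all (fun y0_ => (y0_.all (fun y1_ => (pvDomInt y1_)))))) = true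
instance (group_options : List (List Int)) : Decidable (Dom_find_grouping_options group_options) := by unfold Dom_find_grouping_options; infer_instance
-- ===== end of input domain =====

-- ===== PORT A =====
-- B changes: one recursive helper building the grouping level by level with a running union, instead of four nested loops (objective: simpler).
def find_grouping_options (group_options : List (List Int)) : List (List (List Int)) :=
  group_options.flatMap (fun g1 =>
    group_options.flatMap (fun g2 =>
      if g2.any (fun x => g1.contains x) then [] else
      group_options.flatMap (fun g3 =>
        if g3.any (fun x => g1.contains x) || g3.any (fun x => g2.contains x) then [] else
        group_options.flatMap (fun g4 =>
          if g4.any (fun x => g1.contains x) || g4.any (fun x => g2.contains x) || g4.any (fun x => g3.contains x) then [] else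
          [[g1, g2, g3, g4]]))))

-- ===== PORT B =====
def fgAltGo (opts : List (List Int)) (chosen : List (List Int)) (used : List Int) : Nat → List (List (List Int))
  | 0 => [chosen]
  | Nat.succ k => opts.flatMap (fun g =>
      if g.any (fun x => used.contains x) then []
      else fgAltGo opts (chosen ++ [g]) (used ++ g) k)

def find_grouping_options_alt (group_options : List (List Int)) : List (List (List Int)) :=
  fgAltGo group_options [] [] 4

-- ===== PRECONDITION & SPEC =====
def Spec_find_grouping_options (group_options : List (List Int)) (out : List (List (List Int))) : Prop := out = find_grouping_options_alt group_options
instance (group_options : List (List Int)) (out : List (List (List Int))) : Decidable (Spec_find_grouping_options group_options out) := by unfold Spec_find_grouping_options; infer_instance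

-- ===== CLAIM (what is proved, stated in full; the proofs are below) =====
def Claim_equal_find_grouping_options : Prop := ∀ (group_options : List (List Int)), Dom_find_grouping_options group_options → Spec_find_grouping_options group_options (find_grouping_options group_options)

-- ===== LEMMAS AND PROOFS =====
theorem any_contains_nil (g : List Int) : (g.any fun x => List.contains ([] : List Int) x) = false := by
  induction g <;> simp [*]

theorem any_contains_append (g u v : List Int) :
    (g.any (fun x => (u ++ v).contains x)) = (g.any (fun x => u.contains x) || g.any (fun x => v.contains x)) := by
  rw [Bool.eq_iff_iff]
  simp only [List.any_eq_true, Bool.or_eq_true, List.contains_iff_mem, List.mem_append]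
  aesop

-- ===== VERDICT (by name: the statement is the Claim_ definition above) =====
theorem find_grouping_options_spec : Claim_equal_find_grouping_options := by
  intro opts _
  unfold Spec_find_grouping_options find_grouping_options find_grouping_options_alt
  simp only [fgAltGo, any_contains_nil, any_contains_append, Bool.false_eq_true, if_false,
    List.nil_append, List.cons_append, Bool.or_assoc]
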